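-- pv_equiv track=rewrite | github.com/christofsteel/ip2klingon | ip2klingon.py | number2klingon
-- ===== SOURCE A (Python) =====
-- ones = ["pagh", "wa’", "cha’", "wej", "loS", "vagh", "jav", "Soch", "chrogh", "Hut"]
--
-- ten = "maH"
--
-- hundred = "vatlh"
--
-- def number2klingon(numberS):
--     number = int(numberS)
--     if number > 255:
--         raise RuntimeError("Not a valid IPv4 address")
--     if number < 10:
--         return ones[number]
--     elif number < 100:
--         t = int(number / 10)
--         if number % 10 != 0:
--             return ones[t] + ten + " " + number2klingon(number % 10)
--         else:
--             return ones[t] + ten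
--     else:
--         h = int(number / 100)
--         if number % 100 != 0:
--             return ones[h] + hundred + " " + number2klingon(number % 100)
--         else:
--             return ones[h] + hundred
-- ===== SOURCE B (Python) =====
-- ones = ["pagh", "wa’", "cha’", "wej", "loS", "vagh", "jav", "Soch", "chrogh", "Hut"]
--
-- ten = "maH"
--
-- hundred = "vatlh"
--
-- def number2klingon(numberS):
--     number = int(numberS)
--     if number > 255:
--         raise RuntimeError("Not a valid IPv4 address")
--     if number < 10:
--         return ones[number]
--     h, r = divmod(number, 100)
--     t, o = divmod(r, 10)
--     parts = []
--     if h != 0: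
--         parts.append(ones[h] + hundred)
--     if t != 0:
--         parts.append(ones[t] + ten)
--     if o != 0:
--         parts.append(ones[o])
--     return " ".join(parts)
-- ===== Notes on version B (the rewrite author's own statement) =====
-- stated objective: simpler
-- what changed: Replaced the 3-level recursion (calling itself on number%10 / number%100) with a single non-recursive digit extraction via divmod that collects the non-zero digit words in a list and joins them with spaces.
import Mathlib
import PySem

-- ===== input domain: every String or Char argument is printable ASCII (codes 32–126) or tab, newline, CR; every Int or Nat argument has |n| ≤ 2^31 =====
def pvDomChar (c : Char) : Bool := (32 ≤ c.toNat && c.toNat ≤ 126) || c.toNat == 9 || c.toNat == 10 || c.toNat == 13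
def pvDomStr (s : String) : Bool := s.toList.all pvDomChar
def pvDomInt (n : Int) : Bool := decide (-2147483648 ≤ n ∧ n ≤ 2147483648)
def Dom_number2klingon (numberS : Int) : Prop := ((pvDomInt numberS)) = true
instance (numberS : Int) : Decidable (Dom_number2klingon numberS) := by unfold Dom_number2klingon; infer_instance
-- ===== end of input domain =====

-- B replaces A's 3-level recursion with one direct divmod digit extraction joined by spaces (simpler).

-- ===== PORT A =====
def pvOnes : List String := ["pagh", "wa’", "cha’", "wej", "loS", "vagh", "jav", "Soch", "chrogh", "Hut"]

def pvTen : String := "maH"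

def pvHundred : String := "vatlh"

-- A's recursion has depth ≤ 3 (100s → 10s → 1s); fuel 3 only makes the same recursion structural.
-- int(number/10) truncates toward zero; arguments here are nonnegative, Int.div is exact there.
def pvGoA : Nat → Int → String
  | 0, _ => ""
  | Nat.succ fuel, number =>
    if number > 255 then "" -- raise RuntimeError: outside Pre_
    else if number < 10 then (PySem.List.pyGet? pvOnes number).getD "" -- IndexError = none: outside Pre_
    else if number < 100 then
      let t := Int.tdiv number 10
      if PySem.Int.mod number 10 ≠ 0 then
        (PySem.List.pyGet? pvOnes t).getD "" ++ pvTen ++ " " ++ pvGoA fuel (PySem.Int.mod number 10)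
      else (PySem.List.pyGet? pvOnes t).getD "" ++ pvTen
    else
      let h := Int.tdiv number 100
      if PySem.Int.mod number 100 ≠ 0 then
        (PySem.List.pyGet? pvOnes h).getD "" ++ pvHundred ++ " " ++ pvGoA fuel (PySem.Int.mod number 100)
      else (PySem.List.pyGet? pvOnes h).getD "" ++ pvHundred

def number2klingon (numberS : Int) : String := pvGoA 3 numberS

-- ===== PORT B =====
def number2klingon_alt (numberS : Int) : String :=
  let number := numberS
  if number > 255 then "" -- raise RuntimeError: outside Pre_
  else if number < 10 then (PySem.List.pyGet? pvOnes number).getD "" -- IndexError = none: outside Pre_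
  else
    let h := PySem.Int.floordiv number 100
    let r := PySem.Int.mod number 100
    let t := PySem.Int.floordiv r 10
    let o := PySem.Int.mod r 10
    let parts : List String :=
      (if h ≠ 0 then [(PySem.List.pyGet? pvOnes h).getD "" ++ pvHundred] else []) ++
      (if t ≠ 0 then [(PySem.List.pyGet? pvOnes t).getD "" ++ pvTen] else []) ++
      (if o ≠ 0 then [(PySem.List.pyGet? pvOnes o).getD ""] else [])
    PySem.Str.join " " parts

-- ===== PRECONDITION & SPEC =====
-- A raises RuntimeError for number > 255 and IndexError for number < -10 (ones[number] out of range);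
-- Pre_ admits exactly the inputs where A returns, including the negative-index wraparound -10..-1.
def Pre_number2klingon (numberS : Int) : Prop := -10 ≤ numberS ∧ numberS ≤ 255
instance (numberS : Int) : Decidable (Pre_number2klingon numberS) := by unfold Pre_number2klingon; infer_instance
def pvWitness_number2klingon : Int := (123)
def Spec_number2klingon (numberS : Int) (out : String) : Prop := out = number2klingon_alt numberS
instance (numberS : Int) (out : String) : Decidable (Spec_number2klingon numberS out) := by unfold Spec_number2klingon; infer_instance

-- ===== CLAIM (what is proved, stated in full; the proofs are below) =====
def Claim_equal_number2klingon : Prop := ∀ (numberS : Int), Dom_number2klingon numberS → Pre_number2klingon numberS → Spec_number2klingon numberS (number2klingon numberS)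

-- ===== LEMMAS AND PROOFS =====

-- ===== VERDICT (by name: the statement is the Claim_ definition above) =====
theorem number2klingon_spec : Claim_equal_number2klingon := by
  intro n _ hpre
  obtain ⟨h1, h2⟩ := hpre
  unfold Spec_number2klingon
  interval_cases n <;> decide
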